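-- pv_equiv track=rewrite | github.com/SebastianLoef/adventofcode-2023 | src/solutions/day1.py | part1
-- ===== SOURCE A (Python) =====
-- def part1(data: list[str]) -> int:
--     summan = 0
--     for row in data:
--         first_digit = ""
--         last_digit = ""
--         for i, char in enumerate(row):
--             if first_digit and last_digit:
--                 break
--             char_r = row[len(row) - i - 1]
--             if not first_digit and char.isnumeric():
--                 first_digit = char
--             if not last_digit and char_r.isnumeric():
--                 last_digit = char_r
--         summan += int(first_digit + last_digit)
--     return summan
-- ===== SOURCE B (Python) =====
-- def part1(data: list[str]) -> int:
--     total = 0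
--     for row in data:
--         digits = [c for c in row if c.isnumeric()]
--         total += int(digits[0] + digits[-1])
--     return total
-- ===== Notes on version B (the rewrite author's own statement) =====
-- stated objective: simpler
-- what changed: Replaces A's simultaneous forward/backward dual-sentinel scan with early break by one filter pass collecting all digit characters, then indexing its first and last element.
-- outside the precondition, e.g. on part1(['abc']): A raises ValueError, B raises IndexError
import Mathlib
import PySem

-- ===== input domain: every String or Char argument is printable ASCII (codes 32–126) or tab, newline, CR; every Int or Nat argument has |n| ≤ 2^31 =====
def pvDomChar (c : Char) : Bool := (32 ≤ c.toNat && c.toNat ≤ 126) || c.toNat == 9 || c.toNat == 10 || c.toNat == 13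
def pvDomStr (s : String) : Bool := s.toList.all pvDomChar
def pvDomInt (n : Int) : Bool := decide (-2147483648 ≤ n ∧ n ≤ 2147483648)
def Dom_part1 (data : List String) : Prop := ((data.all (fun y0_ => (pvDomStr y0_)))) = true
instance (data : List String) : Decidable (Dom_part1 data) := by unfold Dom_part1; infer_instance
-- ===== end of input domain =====

-- B replaces A's simultaneous forward/backward dual-sentinel scan (with early break)
-- by a single filter pass collecting all digit characters, then taking its first and last.
-- Objective: simpler. (`.isnumeric()` is ported as PySem.Chars.isdigit, exact on this ASCII domain.)

-- ===== PORT A =====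
-- inner 'for i, char in enumerate(row)' loop; n = remaining iterations (starts at row.length),
-- first/last are the Python "" / single-char-string sentinels as List Char
def part1Loop (row : List Char) (n : Nat) (i : Nat) (first last : List Char) :
    List Char × List Char :=
  match n with
  | 0 => (first, last)
  | n + 1 =>
    if first ≠ [] ∧ last ≠ [] then (first, last)
    else
      let c := row.getD i ' '                          -- char (i is in range at every call)
      let cr := row.getD (row.length - i - 1) ' '      -- char_r = row[len(row) - i - 1]
      let first' := if first = [] ∧ PySem.Chars.isdigit c then [c] else first
      let last' := if last = [] ∧ PySem.Chars.isdigit cr then [cr] else last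
      part1Loop row n (i + 1) first' last'

def part1 (data : List String) : Int :=
  data.foldl (fun summan row =>
    let fl := part1Loop row.toList row.toList.length 0 [] []
    -- int(first_digit + last_digit); getD 0 only covers the ValueError case excluded by Pre_
    summan + (PySem.Int.ofChars? (fl.1 ++ fl.2)).getD 0) 0

-- ===== PORT B =====
def part1_alt (data : List String) : Int :=
  data.foldl (fun total row =>
    let digits := row.toList.filter (fun c => PySem.Chars.isdigit c)
    match PySem.List.pyGet? digits 0, PySem.List.pyGet? digits (-1) with
    | some a, some b => total + (PySem.Int.ofChars? [a, b]).getD 0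
    | _, _ => total) 0  -- digits[0] raises IndexError on an empty list; excluded by Pre_

-- ===== PRECONDITION & SPEC =====
-- Pre_ excludes inputs containing a row with no digit character: there A raises ValueError
-- (int('')) and B raises IndexError (digits[0]); neither returns a value.
def Pre_part1 (data : List String) : Prop :=
  (data.all (fun row => row.toList.any (fun c => PySem.Chars.isdigit c))) = true
instance (data : List String) : Decidable (Pre_part1 data) := by unfold Pre_part1; infer_instance

def pvWitness_part1 : List String := ["a1b2c", "7", "x3y"]

def Spec_part1 (data : List String) (out : Int) : Prop := out = part1_alt data
instance (data : List String) (out : Int) : Decidable (Spec_part1 data out) := by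
  unfold Spec_part1; infer_instance

-- ===== CLAIM (what is proved, stated in full; the proofs are below) =====
def Claim_equal_part1 : Prop :=
  ∀ (data : List String), Dom_part1 data → Pre_part1 data → Spec_part1 data (part1 data)

-- ===== LEMMAS AND PROOFS =====

def optChar (o : Option Char) : List Char :=
  match o with
  | none => []
  | some c => [c]

-- the dual scan's invariant: from position i it completes first with the first digit of
-- row.drop i and last with the first digit of row.reverse.drop i
theorem part1Loop_eq (row : List Char) :
    ∀ n i first last, i + n = row.length →
      part1Loop row n i first last =
        ((if first = [] then
            optChar (List.find? (fun c => PySem.Chars.isdigit c) (row.drop i)) else first),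
         (if last = [] then
            optChar (List.find? (fun c => PySem.Chars.isdigit c) (row.reverse.drop i))
          else last)) := by
  intro n
  induction n with
  | zero =>
    intro i first last hi
    have h1 : row.drop i = [] := List.drop_eq_nil_of_le (by omega)
    have h2 : row.reverse.drop i = [] := List.drop_eq_nil_of_le (by simp; omega)
    simp only [part1Loop, h1, h2, List.find?_nil, optChar, Prod.mk.injEq]
    constructor <;> split <;> simp_all
  | succ n ih =>
    intro i first last hi
    have hil : i < row.length := by omega
    have hirl : i < row.reverse.length := by simpa using hil
    have hd : row.drop i = row[i] :: row.drop (i + 1) :=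
      (List.getElem_cons_drop hil).symm
    have hdr : row.reverse.drop i = row.reverse[i] :: row.reverse.drop (i + 1) :=
      (List.getElem_cons_drop hirl).symm
    have hrg : row.reverse[i] = row[row.length - 1 - i] := List.getElem_reverse hirl
    have hc : row.getD i ' ' = row[i] := List.getD_eq_getElem row ' ' hil
    have hcr : row.getD (row.length - i - 1) ' ' = row.reverse[i] := by
      rw [hrg]
      have : row.length - i - 1 = row.length - 1 - i := by omega
      rw [this]
      exact List.getD_eq_getElem row ' ' (by omega)
    rw [part1Loop]
    split
    · rename_i hb
      obtain ⟨hf, hl⟩ := hb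
      simp [if_neg hf, if_neg hl]
    · rw [ih (i + 1) _ _ (by omega)]
      rw [hd, hdr, List.find?_cons, List.find?_cons]
      simp only [hc, hcr]
      congr 1
      · by_cases hf : first = []
        · subst hf
          by_cases hdig : PySem.Chars.isdigit row[i]
          · simp [hdig, optChar]
          · simp [hdig]
        · simp [hf]
      · by_cases hl : last = []
        · subst hl
          rw [hrg] at hdr ⊢
          by_cases hdig : PySem.Chars.isdigit row[row.length - 1 - i]
          · simp [hdig, optChar]
          · simp [hdig]
        · simp [hl]

-- per-row agreement of the two step functions, given the row has a digit
theorem row_step_eq (acc : Int) (row : List Char)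
    (h : row.any (fun c => PySem.Chars.isdigit c) = true) :
    (acc + (PySem.Int.ofChars?
        ((part1Loop row row.length 0 [] []).1 ++ (part1Loop row row.length 0 [] []).2)).getD 0)
      = (match PySem.List.pyGet? (row.filter (fun c => PySem.Chars.isdigit c)) 0,
               PySem.List.pyGet? (row.filter (fun c => PySem.Chars.isdigit c)) (-1) with
         | some a, some b => acc + (PySem.Int.ofChars? [a, b]).getD 0
         | _, _ => acc) := by
  have hne : row.filter (fun c => PySem.Chars.isdigit c) ≠ [] := by
    intro hnil
    rw [List.filter_eq_nil_iff] at hnil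
    obtain ⟨c, hc, hcd⟩ := List.any_eq_true.mp h
    exact hnil c hc hcd
  obtain ⟨a, ds, hds⟩ := List.exists_cons_of_ne_nil hne
  have hlen : 0 < (row.filter (fun c => PySem.Chars.isdigit c)).length :=
    List.length_pos_iff.mpr hne
  have hL := part1Loop_eq row row.length 0 [] [] (by omega)
  have hfind : List.find? (fun c => PySem.Chars.isdigit c) row = some a := by
    rw [← List.head?_filter, hds]; rfl
  have hfindr : List.find? (fun c => PySem.Chars.isdigit c) row.reverse =
      some ((row.filter (fun c => PySem.Chars.isdigit c)).getLast hne) := by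
    rw [← List.head?_filter, List.filter_reverse, List.head?_reverse,
      List.getLast?_eq_some_getLast]
  have hget0 : PySem.List.pyGet? (row.filter (fun c => PySem.Chars.isdigit c)) 0 = some a := by
    rw [hds]; simp [PySem.List.pyGet?, PySem.List.pyIdx?]
  have hgetm1 : PySem.List.pyGet? (row.filter (fun c => PySem.Chars.isdigit c)) (-1) =
      some ((row.filter (fun c => PySem.Chars.isdigit c)).getLast hne) := by
    have hneg : -(((row.filter (fun c => PySem.Chars.isdigit c)).length : Int)) ≤ -1 := by
      omega
    simp only [PySem.List.pyGet?, PySem.List.pyIdx?, List.getLast_eq_getElem]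
    norm_num [hneg]
  simp only [List.drop_zero] at hL
  rw [hL, hget0, hgetm1]
  simp only [if_pos, optChar, hfind, hfindr, List.singleton_append]

-- ===== VERDICT (by name: the statement is the Claim_ definition above) =====
theorem part1_spec : Claim_equal_part1 := by
  intro data _ hpre
  unfold Spec_part1 part1 part1_alt
  apply PySem.List.foldl_congr_mem
  intro acc row hrow
  unfold Pre_part1 at hpre
  have h : row.toList.any (fun c => PySem.Chars.isdigit c) = true := by
    rw [List.all_eq_true] at hpre
    exact hpre row hrow
  exact row_step_eq acc row.toList h
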